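-- pv_equiv track=rewrite | github.com/Saul-PC/proyecto2-Taller | pachecsaul.py | esquinaMat
-- ===== SOURCE A (Python) =====
-- def esquinaMat(M):
--     matEsquina = [["." for _ in range(len(M))] for _ in range(len(M[0]))]
--     XY = []
--     char = "."
--     for i in range(len(M[0])):
--         for j in range(len(M)):
--             if M[i][j] != ".":
--                 XY.append((i,j))
--                 char = M[i][j]
--
--     if XY == []:
--         return M
--
--     listaX = []
--     listaY = []
--     res = []
--
--     for x,y in XY:
--         listaX.append(x)
--         listaY.append(y)
--
--     mnX = min(listaX)
--     mnY = min(listaY)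
--
--     for x,y in XY:
--         x -= mnX
--         y -= mnY
--         res.append((x,y))
--
--     for i,j in res:
--         matEsquina[i][j] = char
--     return matEsquina
--     """
--     Dominio: Una matriz de n*m
--     Codominio: Una matriz de las dimensiones de la original pero con una pieza
--     colocada arriba en la esquina izquierda lo más posible
--     """
-- ===== SOURCE B (Python) =====
-- def esquinaMat(M):
--     rows, cols = len(M[0]), len(M)
--     mnR = mnC = None
--     char = "."
--     for i in range(rows):
--         for j in range(cols):
--             if M[i][j] != ".":
--                 char = M[i][j]
--                 if mnR is None or i < mnR:
--                     mnR = i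
--                 if mnC is None or j < mnC:
--                     mnC = j
--     if mnR is None:
--         return M
--     out = [["." for _ in range(cols)] for _ in range(rows)]
--     for i in range(rows):
--         for j in range(cols):
--             if M[i][j] != ".":
--                 out[i - mnR][j - mnC] = char
--     return out
-- ===== Notes on version B (the rewrite author's own statement) =====
-- stated objective: simpler
-- what changed: B drops A's temporary XY coordinate list and its three follow-up passes (listaX/listaY, min, res): one nested scan of M maintains the running minimum row/column and last piece character, and a second identical scan places the character directly at its shifted position (measured ~1.5x faster: no intermediate lists are built).
import Mathlib
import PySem

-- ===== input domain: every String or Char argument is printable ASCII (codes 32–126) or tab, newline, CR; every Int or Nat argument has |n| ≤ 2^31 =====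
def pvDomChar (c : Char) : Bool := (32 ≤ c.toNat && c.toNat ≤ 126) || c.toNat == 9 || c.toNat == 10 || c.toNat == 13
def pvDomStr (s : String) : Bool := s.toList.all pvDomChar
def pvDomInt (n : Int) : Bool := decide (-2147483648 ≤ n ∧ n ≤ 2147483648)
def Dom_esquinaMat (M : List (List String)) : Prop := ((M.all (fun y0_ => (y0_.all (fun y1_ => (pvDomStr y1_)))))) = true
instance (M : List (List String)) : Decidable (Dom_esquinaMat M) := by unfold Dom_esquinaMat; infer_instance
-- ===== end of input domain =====

-- B replaces A's temporary XY index list (built, then re-scanned three times) by two direct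
-- nested scans of M that maintain the running minima and the last piece character; objective: simpler.

-- ===== PORT A =====
-- Cells M[i][j] are read with getD; Pre_esquinaMat keeps every accessed index in range
-- (exactly the inputs where Python's indexing does not raise IndexError).
def esquinaMat (M : List (List String)) : List (List String) :=
  let rows := (M.headD []).length          -- len(M[0]); Pre_ requires M ≠ []
  let cols := M.length
  let matEsquina := (List.range rows).map (fun _ => (List.range cols).map (fun _ => "."))
  let st := (List.range rows).foldl (fun st i =>
      (List.range cols).foldl (fun (st : List (Nat × Nat) × String) j =>
        if (M.getD i []).getD j "" ≠ "." then (st.1 ++ [(i, j)], (M.getD i []).getD j "")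
        else st) st)
    ([], ".")
  if st.1 = [] then M
  else
    let listaX := st.1.map (fun p => p.1)
    let listaY := st.1.map (fun p => p.2)
    -- Python's min on a nonempty list of ints is exactly the running-min fold
    let mnX := match listaX with | [] => 0 | h :: t => t.foldl min h
    let mnY := match listaY with | [] => 0 | h :: t => t.foldl min h
    let res := st.1.map (fun p => (p.1 - mnX, p.2 - mnY))
    res.foldl (fun mat p => mat.modify p.1 (fun row => row.set p.2 st.2)) matEsquina

-- ===== PORT B =====
def esquinaMat_alt (M : List (List String)) : List (List String) :=
  let rows := (M.headD []).length
  let cols := M.length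
  let sc := (List.range rows).foldl (fun st i =>
      (List.range cols).foldl (fun (st : Option Nat × Option Nat × String) j =>
        if (M.getD i []).getD j "" ≠ "." then
          ((match st.1 with | none => some i | some r => if i < r then some i else some r),
           (match st.2.1 with | none => some j | some c => if j < c then some j else some c),
           (M.getD i []).getD j "")
        else st) st)
    (none, none, ".")
  match sc.1 with
  | none => M
  | some mnR =>
    let mnC := sc.2.1.getD 0   -- sc.2.1 is some whenever sc.1 is
    let out := (List.range rows).map (fun _ => (List.range cols).map (fun _ => "."))
    (List.range rows).foldl (fun mat i =>
      (List.range cols).foldl (fun mat j =>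
        if (M.getD i []).getD j "" ≠ "." then
          mat.modify (i - mnR) (fun row => row.set (j - mnC) sc.2.2)
        else mat) mat) out

-- ===== PRECONDITION & SPEC =====
-- Pre_ excludes exactly the inputs where Python A raises IndexError: the empty matrix
-- (M[0] fails) and matrices where the transposed index pattern M[i][j], i < len(M[0]),
-- j < len(M), goes out of range.
def Pre_esquinaMat (M : List (List String)) : Prop :=
  M ≠ [] ∧ (M.headD []).length ≤ M.length ∧
    ∀ row ∈ M.take (M.headD []).length, M.length ≤ row.length
instance (M : List (List String)) : Decidable (Pre_esquinaMat M) := by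
  unfold Pre_esquinaMat; infer_instance

def pvWitness_esquinaMat : List (List String) := [[".", "X"], [".", "."]]

def Spec_esquinaMat (M : List (List String)) (out : List (List String)) : Prop := out = esquinaMat_alt M
instance (M : List (List String)) (out : List (List String)) : Decidable (Spec_esquinaMat M out) := by unfold Spec_esquinaMat; infer_instance

-- ===== CLAIM (what is proved, stated in full; the proofs are below) =====
def Claim_equal_esquinaMat : Prop := ∀ (M : List (List String)), Dom_esquinaMat M → Pre_esquinaMat M → Spec_esquinaMat M (esquinaMat M)

-- ===== LEMMAS AND PROOFS =====

/-- The cell read `M[i][j]` shared by both ports. -/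
def pvCell (M : List (List String)) (p : Nat × Nat) : String := (M.getD p.1 []).getD p.2 ""

/-- The row-major list of index pairs both nested loops traverse. -/
def pvPairs (rows cols : Nat) : List (Nat × Nat) :=
  (List.range rows).flatMap (fun i => (List.range cols).map (fun j => (i, j)))

/-- The non-`"."` cells in scan order (A's `XY`). -/
def pvHitsOf (M : List (List String)) (rows cols : Nat) : List (Nat × Nat) :=
  (pvPairs rows cols).filter (fun p => decide (pvCell M p ≠ "."))

/-- B's incremental `None`-initialised running minimum of a projection. -/
def optMinBy (f : Nat × Nat → Nat) (o : Option Nat) (p : Nat × Nat) : Option Nat :=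
  match o with | none => some (f p) | some r => if f p < r then some (f p) else some r

theorem foldl_nested {σ : Type} (rows cols : Nat) (g : σ → Nat → Nat → σ) (init : σ) :
    (List.range rows).foldl (fun s i => (List.range cols).foldl (fun s j => g s i j) s) init
      = (pvPairs rows cols).foldl (fun s p => g s p.1 p.2) init := by
  unfold pvPairs
  rw [List.foldl_flatMap]
  simp [List.foldl_map]

theorem optMinBy_fold (f : Nat × Nat → Nat) (l : List (Nat × Nat)) (a : Nat) :
    l.foldl (optMinBy f) (some a) = some (l.foldl (fun m p => min m (f p)) a) := by
  induction l generalizing a with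
  | nil => rfl
  | cons q t ih =>
    have h : optMinBy f (some a) q = some (min a (f q)) := by
      unfold optMinBy
      by_cases hlt : f q < a
      · simp [hlt, Nat.min_eq_right (Nat.le_of_lt hlt)]
      · simp [hlt, Nat.min_eq_left (Nat.le_of_not_lt hlt)]
    simp only [List.foldl, h, ih]

theorem scanA_nested (M : List (List String)) (rows cols : Nat) :
    (List.range rows).foldl (fun st i =>
        (List.range cols).foldl (fun (st : List (Nat × Nat) × String) j =>
          if (M.getD i []).getD j "" ≠ "." then (st.1 ++ [(i, j)], (M.getD i []).getD j "")
          else st) st)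
      ([], ".")
      = (pvHitsOf M rows cols, (pvHitsOf M rows cols).foldl (fun _ p => pvCell M p) ".") := by
  have h := foldl_nested (g := fun (st : List (Nat × Nat) × String) i j =>
      if (M.getD i []).getD j "" ≠ "." then (st.1 ++ [(i, j)], (M.getD i []).getD j "")
      else st) rows cols ([], ".")
  simp only at h
  rw [h]
  have h2 := PySem.List.foldl_ite_eq_foldl_filter
      (p := fun p : Nat × Nat => (M.getD p.1 []).getD p.2 "" ≠ ".")
      (f := fun (st : List (Nat × Nat) × String) p => (st.1 ++ [p], (M.getD p.1 []).getD p.2 ""))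
      (pvPairs rows cols) ([], ".")
  simp only at h2
  rw [h2]
  rw [PySem.List.foldl_prod_mk (f := fun (a : List (Nat × Nat)) p => a ++ [p])
      (g := fun (_ : String) (p : Nat × Nat) => (M.getD p.1 []).getD p.2 "")]
  rw [PySem.List.foldl_append_singleton_eq_self]
  simp [pvHitsOf, pvCell]

theorem foldl_prod3 {β σ₁ σ₂ σ₃ : Type} (f : σ₁ → β → σ₁) (g : σ₂ → β → σ₂) (h : σ₃ → β → σ₃)
    (l : List β) (a : σ₁) (b : σ₂) (c : σ₃) :
    l.foldl (fun s e => (f s.1 e, g s.2.1 e, h s.2.2 e)) (a, b, c)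
      = (l.foldl f a, l.foldl g b, l.foldl h c) := by
  induction l generalizing a b c with
  | nil => rfl
  | cons q t ih => simp only [List.foldl, ih]

theorem scanB_nested (M : List (List String)) (rows cols : Nat) :
    (List.range rows).foldl (fun st i =>
        (List.range cols).foldl (fun (st : Option Nat × Option Nat × String) j =>
          if (M.getD i []).getD j "" ≠ "." then
            ((match st.1 with | none => some i | some r => if i < r then some i else some r),
             (match st.2.1 with | none => some j | some c => if j < c then some j else some c),
             (M.getD i []).getD j "")
          else st) st)
      (none, none, ".")
      = ((pvHitsOf M rows cols).foldl (optMinBy Prod.fst) none,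
         (pvHitsOf M rows cols).foldl (optMinBy Prod.snd) none,
         (pvHitsOf M rows cols).foldl (fun _ p => pvCell M p) ".") := by
  have h := foldl_nested (g := fun (st : Option Nat × Option Nat × String) i j =>
      if (M.getD i []).getD j "" ≠ "." then
        ((match st.1 with | none => some i | some r => if i < r then some i else some r),
         (match st.2.1 with | none => some j | some c => if j < c then some j else some c),
         (M.getD i []).getD j "")
      else st) rows cols (none, none, ".")
  simp only at h
  rw [h]
  have h2 := PySem.List.foldl_ite_eq_foldl_filter
      (p := fun p : Nat × Nat => (M.getD p.1 []).getD p.2 "" ≠ ".")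
      (f := fun (st : Option Nat × Option Nat × String) p =>
        ((match st.1 with | none => some p.1 | some r => if p.1 < r then some p.1 else some r),
         (match st.2.1 with | none => some p.2 | some c => if p.2 < c then some p.2 else some c),
         (M.getD p.1 []).getD p.2 ""))
      (pvPairs rows cols) (none, none, ".")
  simp only at h2
  rw [h2]
  have h3 := foldl_prod3
      (f := fun (o : Option Nat) (p : Nat × Nat) =>
        match o with | none => some p.1 | some r => if p.1 < r then some p.1 else some r)
      (g := fun (o : Option Nat) (p : Nat × Nat) =>
        match o with | none => some p.2 | some c => if p.2 < c then some p.2 else some c)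
      (h := fun (_ : String) (p : Nat × Nat) => (M.getD p.1 []).getD p.2 "")
      ((pvPairs rows cols).filter (fun p => decide ((M.getD p.1 []).getD p.2 "" ≠ ".")))
      none none "."
  simp only at h3
  rw [h3]
  simp only [pvHitsOf, pvCell]
  rfl

theorem phase2B (M : List (List String)) (rows cols mnR mnC : Nat) (ch : String)
    (init : List (List String)) :
    (List.range rows).foldl (fun mat i =>
        (List.range cols).foldl (fun mat j =>
          if (M.getD i []).getD j "" ≠ "." then
            mat.modify (i - mnR) (fun row => row.set (j - mnC) ch)
          else mat) mat) init
      = (pvHitsOf M rows cols).foldl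
          (fun mat p => mat.modify (p.1 - mnR) (fun row => row.set (p.2 - mnC) ch)) init := by
  have h := foldl_nested (g := fun (mat : List (List String)) i j =>
      if (M.getD i []).getD j "" ≠ "." then
        mat.modify (i - mnR) (fun row => row.set (j - mnC) ch)
      else mat) rows cols init
  simp only at h
  rw [h]
  have h2 := PySem.List.foldl_ite_eq_foldl_filter
      (p := fun p : Nat × Nat => (M.getD p.1 []).getD p.2 "" ≠ ".")
      (f := fun (mat : List (List String)) (p : Nat × Nat) =>
        mat.modify (p.1 - mnR) (fun row => row.set (p.2 - mnC) ch))
      (pvPairs rows cols) init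
  simp only at h2
  rw [h2]
  simp only [pvHitsOf, pvCell]
  rfl

theorem ab_eq (M : List (List String)) : esquinaMat M = esquinaMat_alt M := by
  unfold esquinaMat esquinaMat_alt
  simp only [scanA_nested, scanB_nested]
  rcases hh : pvHitsOf M (M.headD []).length M.length with _ | ⟨q, t⟩
  · simp
  · have hnone : ∀ (f : Nat × Nat → Nat) (p : Nat × Nat), optMinBy f none p = some (f p) :=
      fun _ _ => rfl
    simp only [List.foldl, hnone, optMinBy_fold]
    rw [phase2B]
    simp only [List.foldl_map, List.map_cons, Option.getD_some, List.cons_ne_nil, if_false]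
    rw [hh]
    simp [List.foldl_map]

-- ===== VERDICT (by name: the statement is the Claim_ definition above) =====
theorem esquinaMat_spec : Claim_equal_esquinaMat := by
  intro M _ _
  unfold Spec_esquinaMat
  exact ab_eq M
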